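-- pv_equiv track=rewrite | github.com/archisha-codes/VIRTUAL-CA | backend/india_compliance/gst_india/utils/jinja.py | get_non_zero_fields
-- ===== SOURCE A (Python) =====
-- def get_non_zero_fields(data: list, fields: list) -> set:
--     """Returns a list of fields with non-zero values"""
--
--     if isinstance(data, dict):
--         data = [data]
--
--     non_zero_fields = set()
--
--     for row in data:
--         for field in fields:
--             if field not in non_zero_fields and row.get(field, 0) != 0:
--                 non_zero_fields.add(field)
--
--     return non_zero_fields
-- ===== SOURCE B (Python) =====
-- def get_non_zero_fields(data: list, fields: list) -> set:
--     """Returns the set of fields that have a non-zero value in some row."""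
--
--     if isinstance(data, dict):
--         data = [data]
--
--     pending = list(dict.fromkeys(fields))
--     found = []
--     for row in data:
--         if not pending:
--             break
--         found += [f for f in pending if row.get(f, 0) != 0]
--         pending = [f for f in pending if row.get(f, 0) == 0]
--
--     return set(found)
-- ===== Notes on version B (the rewrite author's own statement) =====
-- stated objective: faster
-- what changed: Replaced A's grow-only membership set guarding every (row, field) pair by a shrinking worklist: fields are deduplicated once up front, each row partitions only the still-pending fields into found/pending, and the scan stops early once no fields remain pending.
import Mathlib
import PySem

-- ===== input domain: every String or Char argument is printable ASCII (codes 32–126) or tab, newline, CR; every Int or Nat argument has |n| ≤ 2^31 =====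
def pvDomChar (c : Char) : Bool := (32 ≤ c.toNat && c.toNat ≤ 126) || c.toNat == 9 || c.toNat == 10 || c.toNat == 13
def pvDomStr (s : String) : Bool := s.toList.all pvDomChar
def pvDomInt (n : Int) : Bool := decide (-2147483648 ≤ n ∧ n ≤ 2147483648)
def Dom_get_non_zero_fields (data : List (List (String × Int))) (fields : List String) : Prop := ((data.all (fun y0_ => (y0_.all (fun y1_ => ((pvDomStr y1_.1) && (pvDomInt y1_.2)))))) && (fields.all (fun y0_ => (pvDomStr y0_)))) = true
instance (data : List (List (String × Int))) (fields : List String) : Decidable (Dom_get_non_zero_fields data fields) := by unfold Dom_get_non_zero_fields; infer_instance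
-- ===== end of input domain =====

-- B replaces A's grow-only membership set by a shrinking worklist (dedup fields once, each row
-- partitions the pending fields, early exit when none are pending); same return value.

-- ===== PORT A =====
-- row-major: for each row, for each field, add the field on its first non-zero value.
-- (the 'isinstance(data, dict)' branch cannot fire for the typed list argument and is dropped)
def get_non_zero_fields (data : List (List (String × Int))) (fields : List String) : List String :=
  data.foldl
    (fun non_zero_fields row =>
      fields.foldl
        (fun non_zero_fields field =>
          if !(PySem.Set.contains non_zero_fields field) && ((PySem.Dict.mk row).getD field 0 != 0)
          then PySem.Set.add non_zero_fields field
          else non_zero_fields)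
        non_zero_fields)
    PySem.Set.empty

-- ===== PORT B =====
-- the 'for row in data' loop of Source B, with its 'if not pending: break'
def pvBLoop (rows : List (List (String × Int))) (found pending : List String) : List String :=
  match rows with
  | [] => found
  | row :: rest =>
      if pending.isEmpty then found
      else pvBLoop rest
        (found ++ pending.filter (fun f => (PySem.Dict.mk row).getD f 0 != 0))
        (pending.filter (fun f => (PySem.Dict.mk row).getD f 0 == 0))

def get_non_zero_fields_alt (data : List (List (String × Int))) (fields : List String) : List String :=
  PySem.Set.ofList (pvBLoop data [] (PySem.List.dedup fields))

-- ===== PRECONDITION & SPEC =====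
def Spec_get_non_zero_fields (data : List (List (String × Int))) (fields : List String) (out : List String) : Prop := out = get_non_zero_fields_alt data fields
instance (data : List (List (String × Int))) (fields : List String) (out : List String) : Decidable (Spec_get_non_zero_fields data fields out) := by unfold Spec_get_non_zero_fields; infer_instance

-- ===== CLAIM (what is proved, stated in full; the proofs are below) =====
def Claim_equal_get_non_zero_fields : Prop := ∀ (data : List (List (String × Int))) (fields : List String), Dom_get_non_zero_fields data fields → Spec_get_non_zero_fields data fields (get_non_zero_fields data fields)

-- ===== LEMMAS AND PROOFS =====

-- non-zero test of one row, shared vocabulary of the proofs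
def pvNz (row : List (String × Int)) (f : String) : Bool := (PySem.Dict.mk row).getD f 0 != 0

-- filter by a conjunction = filter twice
lemma filter_and_split {a : Type} (l : List a) (p q : a → Bool) :
    l.filter (fun x => p x && q x) = (l.filter p).filter q := by
  rw [List.filter_filter]
  exact List.filter_congr (fun x _ => Bool.and_comm _ _)

-- Set.contains as a decide, for pointwise Bool reasoning
lemma pvContains_eq (s : List String) (x : String) :
    PySem.Set.contains s x = decide (x ∈ s) := by
  cases hc : PySem.Set.contains s x
  · have hx : x ∉ s := fun h => by
      rw [(PySem.Set.contains_iff s x).mpr h] at hc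
      cases hc
    simp [hx]
  · simp [(PySem.Set.contains_iff s x).mp hc]

-- A's inner loop over fields appends exactly the new fields non-zero in this row, deduped, in order
lemma innerA_eq (row : List (String × Int)) (l : List String) (s : List String) :
    l.foldl
      (fun s f =>
        if !(PySem.Set.contains s f) && ((PySem.Dict.mk row).getD f 0 != 0)
        then PySem.Set.add s f else s) s
    = s ++ (PySem.Set.ofList l).filter (fun f => !(PySem.Set.contains s f) && pvNz row f) := by
  induction l using List.reverseRecOn with
  | nil => simp [PySem.Set.ofList]
  | append_singleton xs x ih =>
      rw [List.foldl_append, ih, List.foldl_cons, List.foldl_nil,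
        PySem.Set.ofList_append_singleton, PySem.Set.add_eq_ite]
      by_cases hs : x ∈ s
      · simp [hs, pvNz, PySem.Set.add_eq_ite]
        split <;> simp [List.filter_append, hs]
      · by_cases hnz : ((PySem.Dict.mk row).getD x 0 != 0) = true
        · by_cases hx : x ∈ PySem.Set.ofList xs
          · simp [hs, hnz, hx, pvNz]
          · simp [hs, hnz, hx, List.filter_append, pvNz]
        · have hnz' : ((PySem.Dict.mk row).getD x 0 != 0) = false := by
            rwa [Bool.not_eq_true] at hnz
          simp [hs, hnz', pvNz, PySem.Set.add_eq_ite]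
          split <;> simp [List.filter_append, hnz']

-- once nothing is pending, A's remaining rows add nothing
lemma foldA_noop (fields : List String) (rows : List (List (String × Int))) (found : List String)
    (h : (PySem.Set.ofList fields).filter (fun f => !(PySem.Set.contains found f)) = []) :
    rows.foldl
      (fun s row =>
        fields.foldl
          (fun s f =>
            if !(PySem.Set.contains s f) && ((PySem.Dict.mk row).getD f 0 != 0)
            then PySem.Set.add s f else s) s)
      found = found := by
  induction rows with
  | nil => rfl
  | cons row rest ih =>
      rw [List.foldl_cons, innerA_eq]
      have hD : (PySem.Set.ofList fields).filter
          (fun f => !(PySem.Set.contains found f) && pvNz row f) = [] := by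
        rw [filter_and_split, h]
        rfl
      rw [hD, List.append_nil]
      exact ih

-- main invariant: A's remaining fold equals B's loop with pending = the not-yet-found deduped fields
lemma mainInv (fields : List String) (rows : List (List (String × Int))) (found : List String) :
    rows.foldl
      (fun s row =>
        fields.foldl
          (fun s f =>
            if !(PySem.Set.contains s f) && ((PySem.Dict.mk row).getD f 0 != 0)
            then PySem.Set.add s f else s) s)
      found
    = pvBLoop rows found ((PySem.Set.ofList fields).filter (fun f => !(PySem.Set.contains found f))) := by
  induction rows generalizing found with
  | nil => rfl
  | cons row rest ih =>
      rw [List.foldl_cons, innerA_eq]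
      by_cases hp : ((PySem.Set.ofList fields).filter (fun f => !(PySem.Set.contains found f))).isEmpty = true
      · have hpe : (PySem.Set.ofList fields).filter (fun f => !(PySem.Set.contains found f)) = [] :=
          List.isEmpty_iff.mp hp
        have hD : (PySem.Set.ofList fields).filter
            (fun f => !(PySem.Set.contains found f) && pvNz row f) = [] := by
          rw [filter_and_split, hpe]; rfl
        rw [hD, List.append_nil]
        simp only [pvBLoop, hp, if_true]
        exact foldA_noop fields rest found hpe
      · have e1 : (PySem.Set.ofList fields).filter
            (fun f => !(PySem.Set.contains found f) && pvNz row f)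
            = ((PySem.Set.ofList fields).filter (fun f => !(PySem.Set.contains found f))).filter
                (fun f => (PySem.Dict.mk row).getD f 0 != 0) := by
          rw [filter_and_split]; rfl
        have e2 : (PySem.Set.ofList fields).filter
            (fun f => !(PySem.Set.contains (found ++
              ((PySem.Set.ofList fields).filter (fun f => !(PySem.Set.contains found f))).filter
                (fun f => (PySem.Dict.mk row).getD f 0 != 0)) f))
            = ((PySem.Set.ofList fields).filter (fun f => !(PySem.Set.contains found f))).filter
                (fun f => (PySem.Dict.mk row).getD f 0 == 0) := by
          conv_rhs => rw [← filter_and_split]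
          apply List.filter_congr
          intro f hf
          rw [pvContains_eq, pvContains_eq]
          by_cases hfd : f ∈ found
          · simp [hfd, List.mem_append]
          · by_cases hz : (PySem.Dict.mk row).getD f 0 = 0
            · simp [hfd, hz, List.mem_append, List.mem_filter, pvContains_eq]
            · simp [hfd, hz, List.mem_append, List.mem_filter, pvContains_eq, hf]
        simp only [pvBLoop]
        rw [if_neg hp, e1, ih, e2]

lemma pvBLoop_nodup (rows : List (List (String × Int))) (found pending : List String)
    (h : (found ++ pending).Nodup) : (pvBLoop rows found pending).Nodup := by
  induction rows generalizing found pending with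
  | nil => exact ((List.nodup_append).mp h).1
  | cons row rest ih =>
      by_cases hp : pending.isEmpty = true
      · simp only [pvBLoop, hp, if_true]
        exact ((List.nodup_append).mp h).1
      · simp only [pvBLoop, hp, if_false]
        apply ih
        rw [List.append_assoc]
        obtain ⟨hf, hpn, hdisj⟩ := (List.nodup_append).mp h
        rw [List.nodup_append]
        refine ⟨hf, ?_, ?_⟩
        · rw [List.nodup_append]
          refine ⟨hpn.filter _, hpn.filter _, ?_⟩
          intro a ha b hb hab
          subst hab
          have h1 := (List.mem_filter.mp ha).2
          have h2 := (List.mem_filter.mp hb).2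
          rw [bne] at h1
          simp only [Bool.not_eq_eq_eq_not, Bool.not_true, beq_eq_false_iff_ne] at h1
          exact h1 (by simpa using h2)
        · intro a ha b hb
          rcases List.mem_append.mp hb with h2 | h2
          · exact hdisj a ha b ((List.mem_filter.mp h2).1)
          · exact hdisj a ha b ((List.mem_filter.mp h2).1)

-- ===== VERDICT (by name: the statement is the Claim_ definition above) =====
theorem get_non_zero_fields_spec : Claim_equal_get_non_zero_fields := by
  intro data fields _hdom
  unfold Spec_get_non_zero_fields
  simp only [get_non_zero_fields, get_non_zero_fields_alt]
  have h0 : (PySem.Set.ofList fields).filter (fun f => !(PySem.Set.contains ([] : List String) f))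
      = PySem.Set.ofList fields := by
    simp [PySem.Set.contains]
  have hA := mainInv fields data ([] : List String)
  rw [h0] at hA
  have hd : PySem.List.dedup fields = PySem.Set.ofList fields := by simp
  rw [hd]
  have hnodup : (pvBLoop data [] (PySem.Set.ofList fields)).Nodup :=
    pvBLoop_nodup data [] _ (by simpa using PySem.Set.nodup_ofList fields)
  calc data.foldl _ PySem.Set.empty = pvBLoop data [] (PySem.Set.ofList fields) := hA
    _ = PySem.Set.ofList (pvBLoop data [] (PySem.Set.ofList fields)) :=
        (PySem.Set.ofList_eq_self_of_nodup _ hnodup).symm
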